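-- pv_equiv track=rewrite | github.com/TruongPN-dev/bai-dau-tien | lession_01-python-basic/b2.py | in_3_so_le
-- ===== SOURCE A (Python) =====
-- def in_3_so_le(tu,den):
--     chuoi = ""
--     dem = 1
--     while tu <= den:
--         if tu % 2 != 0:
--             if den % 2 == 0:
--                 if tu != (den - 1) and dem != 3:
--                     chuoi += str(tu) + ", "
--                     dem += 1
--                 else:
--                     chuoi += str(tu) + "\n"
--                     dem = 1
--             else:
--                 if tu != den and dem != 3:
--                     chuoi += str(tu) + ", "
--                     dem += 1
--                 else:
--                     chuoi += str(tu) + "\n"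
--                     dem = 1
--         tu += 1
--     return chuoi
-- ===== SOURCE B (Python) =====
-- def in_3_so_le(tu, den):
--     odds = [str(x) for x in range(tu, den + 1) if x % 2 != 0]
--     result = ""
--     i = 0
--     while i < len(odds):
--         result += ", ".join(odds[i:i + 3]) + "\n"
--         i += 3
--     return result
-- ===== Notes on version B (the rewrite author's own statement) =====
-- stated objective: simpler
-- what changed: B filters the odd numbers out of the range once and emits them in chunks of three via ', '.join + newline, replacing A's stateful loop with a running counter and den-parity/den-1 last-element branching.
import Mathlib
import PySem

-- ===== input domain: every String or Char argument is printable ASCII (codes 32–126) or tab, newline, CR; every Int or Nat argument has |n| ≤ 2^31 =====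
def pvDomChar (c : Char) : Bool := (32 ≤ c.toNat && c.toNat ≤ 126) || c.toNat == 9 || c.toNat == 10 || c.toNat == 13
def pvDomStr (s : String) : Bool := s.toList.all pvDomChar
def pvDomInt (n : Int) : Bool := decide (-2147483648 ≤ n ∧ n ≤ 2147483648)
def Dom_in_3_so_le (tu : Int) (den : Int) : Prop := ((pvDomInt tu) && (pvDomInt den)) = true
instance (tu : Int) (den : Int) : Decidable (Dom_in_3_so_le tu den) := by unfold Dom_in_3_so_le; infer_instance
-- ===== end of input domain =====

-- B rebuilds the result by filtering the odd numbers out of the range once and joining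
-- them in chunks of three, dropping A's running counter and parity branching (objective: simpler).

-- ===== PORT A =====
-- while tu <= den: the loop runs exactly (den+1-tu).toNat times; fuel only makes it total.
def pyLoopA : Nat → Int → Int → String → Int → String
  | 0, _, _, chuoi, _ => chuoi
  | fuel + 1, tu, den, chuoi, dem =>
    if tu ≤ den then
      if PySem.Int.mod tu 2 ≠ 0 then
        if PySem.Int.mod den 2 = 0 then
          if tu ≠ den - 1 ∧ dem ≠ 3 then
            pyLoopA fuel (tu + 1) den (chuoi ++ PySem.Int.toStr tu ++ ", ") (dem + 1)
          else
            pyLoopA fuel (tu + 1) den (chuoi ++ PySem.Int.toStr tu ++ "\n") 1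
        else
          if tu ≠ den ∧ dem ≠ 3 then
            pyLoopA fuel (tu + 1) den (chuoi ++ PySem.Int.toStr tu ++ ", ") (dem + 1)
          else
            pyLoopA fuel (tu + 1) den (chuoi ++ PySem.Int.toStr tu ++ "\n") 1
      else
        pyLoopA fuel (tu + 1) den chuoi dem
    else chuoi

def in_3_so_le (tu : Int) (den : Int) : String :=
  pyLoopA (den + 1 - tu).toNat tu den "" 1

-- ===== PORT B =====
-- while i < len(odds): result += ", ".join(odds[i:i+3]) + "\n"; i += 3
-- ported as structural recursion consuming the list (odds[i:i+3] = take 3 of what is left, i += 3 = drop 3).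
def chunkLines : List String → String
  | [] => ""
  | [a] => PySem.Str.join ", " [a] ++ "\n"
  | [a, b] => PySem.Str.join ", " [a, b] ++ "\n"
  | a :: b :: c :: rest => PySem.Str.join ", " [a, b, c] ++ "\n" ++ chunkLines rest

def in_3_so_le_alt (tu : Int) (den : Int) : String :=
  chunkLines (((PySem.List.pyRange tu (den + 1) 1).filter
      (fun x => PySem.Int.mod x 2 ≠ 0)).map PySem.Int.toStr)

-- ===== PRECONDITION & SPEC =====
def Spec_in_3_so_le (tu : Int) (den : Int) (out : String) : Prop := out = in_3_so_le_alt tu den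
instance (tu : Int) (den : Int) (out : String) : Decidable (Spec_in_3_so_le tu den out) := by unfold Spec_in_3_so_le; infer_instance

-- ===== CLAIM (what is proved, stated in full; the proofs are below) =====
def Claim_equal_in_3_so_le : Prop := ∀ (tu : Int) (den : Int), Dom_in_3_so_le tu den → Spec_in_3_so_le tu den (in_3_so_le tu den)

-- ===== LEMMAS AND PROOFS =====

-- the odd numbers of range(tu, den+1), as A visits them
def oddsL (tu den : Int) : List Int :=
  (PySem.List.pyRange tu (den + 1) 1).filter (fun x => PySem.Int.mod x 2 ≠ 0)

-- A's loop body as a recursion over the list of odd numbers, with its counter dem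
def render : List String → Int → String
  | [], _ => ""
  | s :: rest, dem =>
    if rest = [] ∨ dem = 3 then s ++ "\n" ++ render rest 1
    else s ++ ", " ++ render rest (dem + 1)

theorem odds_nil (tu den : Int) (h : den < tu) : oddsL tu den = [] := by
  unfold oddsL
  rw [PySem.List.pyRange_one_eq_nil (by omega)]
  rfl

theorem odds_cons_even (tu den : Int) (h : tu ≤ den) (he : tu % 2 = 0) :
    oddsL tu den = oddsL (tu + 1) den := by
  unfold oddsL
  rw [PySem.List.pyRange_one_cons (by omega)]
  simp [PySem.Int.mod, Int.fmod_eq_emod, he]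

theorem odds_cons_odd (tu den : Int) (h : tu ≤ den) (ho : tu % 2 = 1) :
    oddsL tu den = tu :: oddsL (tu + 1) den := by
  unfold oddsL
  rw [PySem.List.pyRange_one_cons (by omega)]
  simp [PySem.Int.mod, Int.fmod_eq_emod, ho]

theorem odds_next_nil_iff (tu den : Int) (ho : tu % 2 = 1) :
    oddsL (tu + 1) den = [] ↔ den < tu + 2 := by
  constructor
  · intro hnil
    by_contra hlt
    have hmem : tu + 2 ∈ oddsL (tu + 1) den := by
      unfold oddsL
      rw [List.mem_filter]
      refine ⟨PySem.List.mem_pyRange_one.mpr (by omega), ?_⟩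
      simp [PySem.Int.mod, Int.fmod_eq_emod]
      omega
    rw [hnil] at hmem
    exact absurd hmem (List.not_mem_nil)
  · intro hlt
    unfold oddsL
    rw [List.filter_eq_nil_iff]
    intro x hx
    have hx' := PySem.List.mem_pyRange_one.mp hx
    have : x = tu + 1 := by omega
    simp [PySem.Int.mod, Int.fmod_eq_emod, this]
    omega

theorem mod_two (x : Int) : PySem.Int.mod x 2 = x % 2 := by
  simp [PySem.Int.mod, Int.fmod_eq_emod]

theorem loopA_render (fuel : Nat) : ∀ (tu den : Int) (chuoi : String) (dem : Int),
    (den + 1 - tu).toNat ≤ fuel →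
    pyLoopA fuel tu den chuoi dem = chuoi ++ render ((oddsL tu den).map PySem.Int.toStr) dem := by
  induction fuel with
  | zero =>
    intro tu den chuoi dem hf
    rw [odds_nil tu den (by omega)]
    simp [pyLoopA, render]
  | succ fuel ih =>
    intro tu den chuoi dem hf
    by_cases hle : tu ≤ den
    · rcases Int.emod_two_eq tu with he | ho
      · -- tu even: A skips it, the filter drops it
        rw [odds_cons_even tu den hle he]
        simp only [pyLoopA]
        rw [if_pos hle, mod_two, he, if_neg (show ¬((0:Int) ≠ 0) by simp)]
        exact ih (tu + 1) den chuoi dem (by omega)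
      · -- tu odd: A emits it, the filter keeps it
        rw [odds_cons_odd tu den hle ho]
        set rest := (oddsL (tu + 1) den).map PySem.Int.toStr with hrest
        have hnil : rest = [] ↔ den < tu + 2 := by
          rw [hrest, ← odds_next_nil_iff tu den ho]; simp
        simp only [pyLoopA, List.map_cons]
        rw [if_pos hle, mod_two tu, ho, if_pos (show (1:Int) ≠ 0 by omega), mod_two den]
        simp only [render]
        rcases Int.emod_two_eq den with hde | hdo
        · -- den even: the last odd of the range is den - 1
          have hiff : tu = den - 1 ↔ den < tu + 2 := by omega
          rw [hde, if_pos rfl]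
          by_cases hstop : rest = [] ∨ dem = 3
          · rw [if_neg (show ¬(tu ≠ den - 1 ∧ dem ≠ 3) by
                rcases hstop with h | h
                · exact fun hc => hc.1 (hiff.mpr (hnil.mp h))
                · exact fun hc => hc.2 h),
              if_pos hstop, ih (tu + 1) den _ 1 (by omega)]
            apply String.toList_injective; simp
          · rw [if_pos ⟨fun h => hstop (Or.inl (hnil.mpr (hiff.mp h))),
                fun h => hstop (Or.inr h)⟩,
              if_neg hstop, ih (tu + 1) den _ (dem + 1) (by omega)]
            apply String.toList_injective; simp
        · -- den odd: the last odd of the range is den itself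
          have hiff : tu = den ↔ den < tu + 2 := by omega
          rw [hdo, if_neg (show ¬((1:Int) = 0) by omega)]
          by_cases hstop : rest = [] ∨ dem = 3
          · rw [if_neg (show ¬(tu ≠ den ∧ dem ≠ 3) by
                rcases hstop with h | h
                · exact fun hc => hc.1 (hiff.mpr (hnil.mp h))
                · exact fun hc => hc.2 h),
              if_pos hstop, ih (tu + 1) den _ 1 (by omega)]
            apply String.toList_injective; simp
          · rw [if_pos ⟨fun h => hstop (Or.inl (hnil.mpr (hiff.mp h))),
                fun h => hstop (Or.inr h)⟩,
              if_neg hstop, ih (tu + 1) den _ (dem + 1) (by omega)]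
            apply String.toList_injective; simp
    · rw [odds_nil tu den (by omega)]
      simp [pyLoopA, hle, render]

theorem render_eq_chunkLines (l : List String) : render l 1 = chunkLines l := by
  match l with
  | [] => rfl
  | [a] =>
    apply String.toList_injective
    simp [render, chunkLines, PySem.Chars.join, List.intercalate]
  | [a, b] =>
    apply String.toList_injective
    simp [render, chunkLines, PySem.Chars.join, List.intercalate]
  | a :: b :: c :: rest =>
    have ih := render_eq_chunkLines rest
    apply String.toList_injective
    simp [render, chunkLines, PySem.Chars.join, List.intercalate, ← ih]

-- ===== VERDICT (by name: the statement is the Claim_ definition above) =====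
theorem in_3_so_le_spec : Claim_equal_in_3_so_le := by
  intro tu den _
  unfold Spec_in_3_so_le in_3_so_le in_3_so_le_alt
  rw [loopA_render _ tu den "" 1 (le_refl _)]
  rw [render_eq_chunkLines]
  apply String.toList_injective
  simp [oddsL]
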